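-- pv_equiv track=rewrite | github.com/TrellixVulnTeam/libmunin_GW0S | munin/provider/moodbar.py | find_dominant_colors
-- ===== SOURCE A (Python) =====
-- from collections import Counter, namedtuple
--
-- def find_dominant_colors(vector, samples, roundoff=17):
--     """Find the most dominant colors in the vector.
--
--     :param vector: The vector of rgb triples.
--     :param samples: How many dominant colors to find.
--     :param roundoff: How much grouping shall be done,
--                      high numbers lead to less possible colors.
--
--     :returns: A list with the dominant colors (max len is samples)
--               and the percent of black colors as integer.
--     """
--     blackness_count, result = 0, []
--     data = [tuple([int(v / roundoff) * roundoff for v in rgb]) for rgb in vector]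
--
--     for color, count in Counter(data).most_common():
--         # Do not count very dark colors:
--         if all(map(lambda channel: channel <= roundoff, color)):
--             blackness_count += count
--         else:
--             result.append((color, count))
--
--     return result[:samples], int(round(blackness_count / 10))
-- ===== SOURCE B (Python) =====
-- from collections import Counter
--
-- def find_dominant_colors(vector, samples, roundoff=17):
--     rounded = [tuple(int(v / roundoff) * roundoff for v in rgb) for rgb in vector]
--     is_black = lambda color: all(channel <= roundoff for channel in color)
--     blackness_count = sum(1 for color in rounded if is_black(color))
--     result = Counter(c for c in rounded if not is_black(c)).most_common()[:samples]
--     return result, int(round(blackness_count / 10))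
-- ===== Notes on version B (the rewrite author's own statement) =====
-- stated objective: simpler
-- what changed: Instead of one loop over most_common() that partitions entries into black-count and result, B counts black pixels directly on the rounded list and builds the Counter over only the non-black rounded colors, taking most_common()[:samples] straight away.
import Mathlib
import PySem

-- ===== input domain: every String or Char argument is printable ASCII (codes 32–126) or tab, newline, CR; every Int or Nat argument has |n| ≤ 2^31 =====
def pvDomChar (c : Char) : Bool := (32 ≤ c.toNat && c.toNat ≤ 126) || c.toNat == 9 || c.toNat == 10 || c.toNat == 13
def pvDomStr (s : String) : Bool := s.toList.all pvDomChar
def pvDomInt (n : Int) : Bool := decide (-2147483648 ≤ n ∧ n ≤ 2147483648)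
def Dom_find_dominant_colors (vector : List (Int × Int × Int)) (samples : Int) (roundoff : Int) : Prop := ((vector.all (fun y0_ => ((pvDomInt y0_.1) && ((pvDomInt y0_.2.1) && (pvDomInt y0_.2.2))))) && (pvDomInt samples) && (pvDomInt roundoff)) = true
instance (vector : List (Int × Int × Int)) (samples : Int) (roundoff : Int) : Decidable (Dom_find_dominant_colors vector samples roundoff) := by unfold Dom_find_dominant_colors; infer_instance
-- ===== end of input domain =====

-- B replaces A's single partitioning loop over most_common() by a direct black-pixel count plus a
-- Counter over only the non-black rounded colors (same values; a simpler decomposition, not faster).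


-- shared primitive ports (both Pythons compute these same expressions):
-- Python's int(round(n / 10)) for an int n: banker's rounding of n/10 (exact for |n| ≤ 2^31)
def pyRoundDiv10 (n : Int) : Int :=
  let q := PySem.Int.floordiv n 10
  let r := PySem.Int.mod n 10
  if r < 5 then q else if 5 < r then q + 1 else if PySem.Int.mod q 2 = 0 then q else q + 1

-- tuple(int(v / roundoff) * roundoff for v in rgb): int(v/r) truncates toward zero, exact on |v| ≤ 2^31
def pvRound3 (roundoff : Int) (rgb : Int × Int × Int) : Int × Int × Int :=
  (PySem.Int.truncdiv rgb.1 roundoff * roundoff,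
   PySem.Int.truncdiv rgb.2.1 roundoff * roundoff,
   PySem.Int.truncdiv rgb.2.2 roundoff * roundoff)

-- all(channel <= roundoff for the three channels)
def pvIsBlack (roundoff : Int) (c : Int × Int × Int) : Bool :=
  decide (c.1 ≤ roundoff) && decide (c.2.1 ≤ roundoff) && decide (c.2.2 ≤ roundoff)

-- ===== PORT A =====
-- Counter(data).most_common() = sorted(items, key=count, reverse=True); then one loop partitioning
def find_dominant_colors (vector : List (Int × Int × Int)) (samples : Int) (roundoff : Int) : (List ((Int × Int × Int) × Int)) × Int :=
  let data := vector.map (pvRound3 roundoff)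
  let loop := (PySem.List.sorted (PySem.Dict.counter data).items (fun p => p.2) true).foldl
      (fun (acc : Int × List ((Int × Int × Int) × Int)) p =>
        if pvIsBlack roundoff p.1 then (acc.1 + p.2, acc.2) else (acc.1, acc.2 ++ [p]))
      (0, [])
  (PySem.List.slice loop.2 none (some samples), pyRoundDiv10 loop.1)

-- ===== PORT B =====
def find_dominant_colors_alt (vector : List (Int × Int × Int)) (samples : Int) (roundoff : Int) : (List ((Int × Int × Int) × Int)) × Int :=
  let rounded := vector.map (pvRound3 roundoff)
  let blackness_count : Int := (rounded.countP (fun c => pvIsBlack roundoff c) : Int)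
  let result := PySem.List.slice
      (PySem.List.sorted (PySem.Dict.counter (rounded.filter (fun c => !pvIsBlack roundoff c))).items (fun p => p.2) true)
      none (some samples)
  (result, pyRoundDiv10 blackness_count)

-- ===== PRECONDITION & SPEC =====
-- roundoff = 0 with a non-empty vector makes Python's v / roundoff raise ZeroDivisionError (in both A and B); nothing else raises.
def Pre_find_dominant_colors (vector : List (Int × Int × Int)) (samples : Int) (roundoff : Int) : Prop := roundoff ≠ 0 ∨ vector = []
instance (vector : List (Int × Int × Int)) (samples : Int) (roundoff : Int) : Decidable (Pre_find_dominant_colors vector samples roundoff) := by unfold Pre_find_dominant_colors; infer_instance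
def pvWitness_find_dominant_colors : (List (Int × Int × Int)) × Int × Int := ([(200, 30, 10), (5, 5, 5), (200, 30, 10)], 2, 17)
def Spec_find_dominant_colors (vector : List (Int × Int × Int)) (samples : Int) (roundoff : Int) (out : (List ((Int × Int × Int) × Int)) × Int) : Prop := out = find_dominant_colors_alt vector samples roundoff
instance (vector : List (Int × Int × Int)) (samples : Int) (roundoff : Int) (out : (List ((Int × Int × Int) × Int)) × Int) : Decidable (Spec_find_dominant_colors vector samples roundoff out) := by unfold Spec_find_dominant_colors; infer_instance

-- ===== CLAIM (what is proved, stated in full; the proofs are below) =====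
def Claim_equal_find_dominant_colors : Prop := ∀ (vector : List (Int × Int × Int)) (samples : Int) (roundoff : Int), Dom_find_dominant_colors vector samples roundoff → Pre_find_dominant_colors vector samples roundoff → Spec_find_dominant_colors vector samples roundoff (find_dominant_colors vector samples roundoff)

-- ===== LEMMAS AND PROOFS =====

-- A's loop over most_common partitions: first component sums counts of black entries, second appends the rest.
theorem pv_foldl_partition (roundoff : Int) (l : List ((Int × Int × Int) × Int)) (b : Int)
    (res : List ((Int × Int × Int) × Int)) :
    l.foldl (fun (acc : Int × List ((Int × Int × Int) × Int)) p =>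
        if pvIsBlack roundoff p.1 then (acc.1 + p.2, acc.2) else (acc.1, acc.2 ++ [p])) (b, res)
      = (b + ((l.filter (fun p => pvIsBlack roundoff p.1)).map (·.2)).sum,
         res ++ l.filter (fun p => !pvIsBlack roundoff p.1)) := by
  induction l generalizing b res with
  | nil => simp
  | cons p t ih =>
    simp only [List.foldl_cons]
    by_cases h : pvIsBlack roundoff p.1 = true
    · rw [if_pos h, ih]; simp [h]; ring
    · rw [if_neg h, ih]; simp [h]

-- filter commutes with one insertion into a descending-sorted list
theorem pv_filter_insertBy {α : Type} (key : α → Int) (p : α → Bool) (x : α) (l : List α)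
    (h : l.Pairwise (fun a b => key b ≤ key a)) :
    (PySem.List.insertBy (fun a b => decide (key b < key a)) x l).filter p
      = if p x then PySem.List.insertBy (fun a b => decide (key b < key a)) x (l.filter p)
        else l.filter p := by
  induction l with
  | nil => cases hpx : p x <;> simp [PySem.List.insertBy, List.filter, hpx]
  | cons y ys ih =>
    rw [List.pairwise_cons] at h
    by_cases hlt : key y < key x
    · have hall : ∀ z ∈ (y :: ys).filter p, key z < key x := by
        intro z hz
        rcases List.mem_cons.mp (List.mem_of_mem_filter hz) with rfl | hz'
        · exact hlt
        · exact lt_of_le_of_lt (h.1 z hz') hlt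
      simp only [PySem.List.insertBy, hlt, decide_true, if_true]
      by_cases hpx : p x = true
      · rw [List.filter_cons_of_pos hpx, if_pos hpx]
        cases hfl : (y :: ys).filter p with
        | nil => simp [PySem.List.insertBy]
        | cons z zs =>
          have : key z < key x := hall z (by rw [hfl]; exact List.mem_cons_self)
          simp [PySem.List.insertBy, this]
      · simp only [Bool.not_eq_true] at hpx
        rw [List.filter_cons_of_neg (by simp [hpx]), if_neg (by simp [hpx])]
    · simp only [PySem.List.insertBy, hlt, decide_false, Bool.false_eq_true, if_false]
      by_cases hpy : p y = true
      · rw [List.filter_cons_of_pos hpy, List.filter_cons_of_pos hpy, ih h.2]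
        by_cases hpx : p x = true
        · simp [hpx, PySem.List.insertBy, hlt]
        · simp [hpx]
      · simp only [Bool.not_eq_true] at hpy
        rw [List.filter_cons_of_neg (by simp [hpy]), List.filter_cons_of_neg (by simp [hpy]), ih h.2]

-- filter commutes with the stable descending sort
theorem pv_filter_sorted {α : Type} (key : α → Int) (p : α → Bool) (xs : List α) :
    (PySem.List.sorted xs key true).filter p = PySem.List.sorted (xs.filter p) key true := by
  induction xs using List.reverseRecOn with
  | nil => simp [PySem.List.sorted]
  | append_singleton t x ih =>
    rw [PySem.List.sorted_rev_eq_foldl_insertBy, List.foldl_append, ← PySem.List.sorted_rev_eq_foldl_insertBy]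
    simp only [List.foldl_cons, List.foldl_nil]
    rw [pv_filter_insertBy key p x _ (PySem.List.sorted_pairwise_rev t key), ih, List.filter_append]
    by_cases hpx : p x = true
    · simp only [hpx, if_true, List.filter_cons_of_pos hpx, List.filter_nil]
      rw [PySem.List.sorted_rev_eq_foldl_insertBy (t.filter p ++ [x]), List.foldl_append,
        ← PySem.List.sorted_rev_eq_foldl_insertBy]
      simp
    · simp only [Bool.not_eq_true] at hpx
      simp [hpx]

-- filter commutes with dedup-preserving set construction (first occurrences)
theorem pv_ofList_filter {α : Type} [BEq α] [LawfulBEq α] (q : α → Bool) (xs : List α) :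
    (PySem.Set.ofList xs).filter q = PySem.Set.ofList (xs.filter q) := by
  induction xs using List.reverseRecOn with
  | nil => simp [PySem.Set.ofList]
  | append_singleton t x ih =>
    have hof : ∀ (l : List α), PySem.Set.ofList (l ++ [x]) = PySem.Set.add (PySem.Set.ofList l) x := by
      intro l; simp [PySem.Set.ofList, List.foldl_append]
    rw [hof, List.filter_append]
    by_cases hqx : q x = true
    · rw [List.filter_cons_of_pos hqx, List.filter_nil, hof]
      simp only [PySem.Set.add]
      have hcont : (PySem.Set.ofList t).contains x = (PySem.Set.ofList (t.filter q)).contains x := by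
        simp only [← ih]
        simp [List.mem_filter, hqx]
      by_cases hc : (PySem.Set.ofList t).contains x = true
      · rw [if_pos hc, if_pos (hcont ▸ hc), ih]
      · rw [if_neg hc, if_neg (by rw [← hcont]; exact hc), List.filter_append,
          List.filter_cons_of_pos hqx, ih]
        simp
    · simp only [Bool.not_eq_true] at hqx
      rw [List.filter_cons_of_neg (by simp [hqx]), List.filter_nil, List.append_nil]
      simp only [PySem.Set.add]
      by_cases hc : (PySem.Set.ofList t).contains x = true
      · rw [if_pos hc, ih]
      · rw [if_neg hc, List.filter_append, List.filter_cons_of_neg (by simp [hqx]), List.filter_nil, ih]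
        simp

-- sum of an equality indicator over a duplicate-free list containing x is 1 (0 if absent)
theorem pv_indicator_sum_zero {a : Type} [DecidableEq a] (x : a) (s : List a) (hx : x ∉ s) :
    (s.map (fun k => if k = x then (1 : Int) else 0)).sum = 0 := by
  induction s with
  | nil => simp
  | cons y ys ih =>
    simp only [List.mem_cons, not_or] at hx
    simp [Ne.symm hx.1, ih hx.2]

theorem pv_indicator_sum_one {a : Type} [DecidableEq a] (x : a) (s : List a)
    (hnd : s.Nodup) (hx : x ∈ s) :
    (s.map (fun k => if k = x then (1 : Int) else 0)).sum = 1 := by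
  induction s with
  | nil => simp at hx
  | cons y ys ih =>
    rcases List.mem_cons.mp hx with rfl | hx'
    · simp [pv_indicator_sum_zero x ys (List.nodup_cons.mp hnd).1]
    · have hyx : y ≠ x := fun h => (List.nodup_cons.mp hnd).1 (h ▸ hx')
      simp [hyx, ih (List.nodup_cons.mp hnd).2 hx']

-- summing the multiplicities over any duplicate-free superset of the elements gives the length
theorem pv_sum_counts_gen (xs : List (Int × Int × Int)) (s : List (Int × Int × Int))
    (hnd : s.Nodup) (hsub : ∀ k ∈ xs, k ∈ s) :
    (s.map (fun k => (xs.count k : Int))).sum = (xs.length : Int) := by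
  induction xs with
  | nil => simp
  | cons x t ih =>
    have hsplit : (s.map (fun k => ((x :: t).count k : Int))).sum
        = (s.map (fun k => (t.count k : Int))).sum
          + (s.map (fun k => if k = x then (1 : Int) else 0)).sum := by
      rw [← List.sum_map_add]
      apply congrArg
      apply List.map_congr_left
      intro k _
      rw [List.count_cons]
      by_cases hkx : k = x
      · simp [hkx]
      · have hxk : ¬ x = k := fun h => hkx h.symm
        simp [hkx, hxk]
    rw [hsplit, ih (fun k hk => hsub k (List.mem_cons_of_mem x hk)),
      pv_indicator_sum_one x s hnd (hsub x List.mem_cons_self)]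
    simp

theorem pv_sum_counts (xs : List (Int × Int × Int)) :
    ((PySem.Set.ofList xs).map (fun k => (xs.count k : Int))).sum = (xs.length : Int) :=
  pv_sum_counts_gen xs _ (PySem.Set.nodup_ofList xs)
    (fun k hk => (PySem.Set.mem_ofList xs k).mpr hk)

-- restricting a Counter's items to a predicate on keys = the Counter of the filtered list
theorem pv_counter_filter (q : (Int × Int × Int) → Bool) (xs : List (Int × Int × Int)) :
    (PySem.Dict.counter xs).items.filter (fun p => q p.1)
      = (PySem.Dict.counter (xs.filter q)).items := by
  rw [PySem.Dict.items_counter, PySem.Dict.items_counter, List.filter_map]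
  have : ((fun (p : (Int × Int × Int) × Int) => q p.1) ∘ (fun k => (k, (xs.count k : Int)))) = q := rfl
  rw [this, pv_ofList_filter]
  apply List.map_congr_left
  intro k hk
  have hq : q k = true := (List.mem_filter.mp ((PySem.Set.mem_ofList _ k).mp hk)).2
  rw [List.count_filter hq]

-- ===== VERDICT (by name: the statement is the Claim_ definition above) =====
theorem find_dominant_colors_spec : Claim_equal_find_dominant_colors := by
  intro vector samples roundoff _ _
  unfold Spec_find_dominant_colors find_dominant_colors find_dominant_colors_alt
  simp only []
  set data := vector.map (pvRound3 roundoff) with hdata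
  rw [pv_foldl_partition]
  simp only [List.nil_append, zero_add, Prod.mk.injEq]
  constructor
  · -- result component
    rw [pv_filter_sorted, pv_counter_filter (fun c => !pvIsBlack roundoff c) data]
  · -- blackness component
    congr 1
    have hperm : ((PySem.List.sorted (PySem.Dict.counter data).items (fun p => p.2) true).filter
        (fun p => pvIsBlack roundoff p.1)).Perm
        ((PySem.Dict.counter data).items.filter (fun p => pvIsBlack roundoff p.1)) :=
      (PySem.List.sorted_perm _ _ _).filter _
    rw [((hperm.map (·.2)).sum_eq : _)]
    rw [pv_counter_filter (fun c => pvIsBlack roundoff c) data, PySem.Dict.items_counter]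
    rw [List.map_map]
    have : ((fun (p : (Int × Int × Int) × Int) => p.2) ∘
        (fun k => (k, ((data.filter (fun c => pvIsBlack roundoff c)).count k : Int))))
        = (fun k => ((data.filter (fun c => pvIsBlack roundoff c)).count k : Int)) := rfl
    rw [this, pv_sum_counts, List.countP_eq_length_filter]
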